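-- pv_equiv track=rewrite | github.com/ttakamura/en_marker | lib/corpus.py | expand_abbr
-- ===== SOURCE A (Python) =====
-- def expand_abbr(line):
--     table = {"haven't": "have not",
--              "hasn't":  "has not",
--              "what's":  "what is",
--              "it's":    "it is",
--              "i'm":     "i am"}
--     for b, a in table.items():
--         line = line.replace(b, a)
--     return line
-- ===== SOURCE B (Python) =====
-- def expand_abbr(line):
--     # single left-to-right scan: at each position emit the expansion of the
--     # first contraction that starts there, otherwise copy the character
--     out = []
--     i = 0
--     n = len(line)
--     while i < n:
--         if line.startswith("haven't", i):
--             out.append("have not"); i += 7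
--         elif line.startswith("hasn't", i):
--             out.append("has not"); i += 6
--         elif line.startswith("what's", i):
--             out.append("what is"); i += 6
--         elif line.startswith("it's", i):
--             out.append("it is"); i += 4
--         elif line.startswith("i'm", i):
--             out.append("i am"); i += 3
--         else:
--             out.append(line[i]); i += 1
--     return ''.join(out)
-- ===== Notes on version B (the rewrite author's own statement) =====
-- stated objective: alternative
-- what changed: Replaces five sequential full-string str.replace passes with one left-to-right scan that, at each position, emits the expansion of the first matching contraction or copies the character; equivalent because keys never overlap each other and no replacement text can create or complete a key.
import Mathlib
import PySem

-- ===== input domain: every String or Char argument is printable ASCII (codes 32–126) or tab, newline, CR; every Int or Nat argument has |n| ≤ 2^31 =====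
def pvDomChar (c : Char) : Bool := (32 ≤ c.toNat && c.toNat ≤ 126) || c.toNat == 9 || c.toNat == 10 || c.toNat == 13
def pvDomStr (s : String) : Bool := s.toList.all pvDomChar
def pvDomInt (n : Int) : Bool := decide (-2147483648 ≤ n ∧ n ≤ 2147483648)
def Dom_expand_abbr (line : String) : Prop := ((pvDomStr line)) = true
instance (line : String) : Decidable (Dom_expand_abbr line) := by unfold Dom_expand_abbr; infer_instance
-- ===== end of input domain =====

-- B replaces A's five sequential full-string str.replace passes by ONE left-to-right scan
-- that at each position emits the expansion of the first matching contraction (alternative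
-- decomposition; equivalent because the keys never overlap and no expansion text can
-- create or complete a key occurrence).

-- ===== PORT A =====
def expand_abbr (line : String) : String :=
  let table : List (String × String) :=
    [("haven't", "have not"), ("hasn't", "has not"), ("what's", "what is"),
     ("it's", "it is"), ("i'm", "i am")]
  table.foldl (fun l bv => PySem.Str.replace l bv.1 bv.2) line

-- ===== PORT B =====
-- the single left-to-right scan of Source B (the while loop with the if/elif chain of
-- startswith tests; `i += len(key)` becomes dropping the matched characters)
def scanAbbr : List Char → List Char
  | [] => []
  | c :: t =>
    if "haven't".toList <+: (c :: t) then "have not".toList ++ scanAbbr (t.drop 6)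
    else if "hasn't".toList <+: (c :: t) then "has not".toList ++ scanAbbr (t.drop 5)
    else if "what's".toList <+: (c :: t) then "what is".toList ++ scanAbbr (t.drop 5)
    else if "it's".toList <+: (c :: t) then "it is".toList ++ scanAbbr (t.drop 3)
    else if "i'm".toList <+: (c :: t) then "i am".toList ++ scanAbbr (t.drop 2)
    else c :: scanAbbr t
termination_by l => l.length
decreasing_by all_goals simp

def expand_abbr_alt (line : String) : String := String.ofList (scanAbbr line.toList)

-- ===== PRECONDITION & SPEC =====
def Spec_expand_abbr (line : String) (out : String) : Prop := out = expand_abbr_alt line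
instance (line : String) (out : String) : Decidable (Spec_expand_abbr line out) := by unfold Spec_expand_abbr; infer_instance

-- ===== CLAIM (what is proved, stated in full; the proofs are below) =====
def Claim_equal_expand_abbr : Prop := ∀ (line : String), Dom_expand_abbr line → Spec_expand_abbr line (expand_abbr line)

-- ===== LEMMAS AND PROOFS =====

-- clean structural form of one pass of PySem.Chars.replace for a NONEMPTY key a :: k
def replL (a : Char) (k v : List Char) : List Char → List Char
  | [] => []
  | c :: t => if (a :: k) <+: (c :: t) then v ++ replL a k v (t.drop k.length) else c :: replL a k v t
termination_by l => l.length
decreasing_by all_goals simp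

lemma replL_nil (a : Char) (k v : List Char) : replL a k v [] = [] := by
  rw [replL.eq_def]

lemma replL_cons (a : Char) (k v : List Char) (c : Char) (t : List Char) :
    replL a k v (c :: t) =
      if (a :: k) <+: (c :: t) then v ++ replL a k v (t.drop k.length) else c :: replL a k v t := by
  rw [replL.eq_def]

lemma scanAbbr_nil : scanAbbr [] = [] := by rw [scanAbbr.eq_def]

lemma scanAbbr_cons (c : Char) (t : List Char) :
    scanAbbr (c :: t) =
      if "haven't".toList <+: (c :: t) then "have not".toList ++ scanAbbr (t.drop 6)
      else if "hasn't".toList <+: (c :: t) then "has not".toList ++ scanAbbr (t.drop 5)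
      else if "what's".toList <+: (c :: t) then "what is".toList ++ scanAbbr (t.drop 5)
      else if "it's".toList <+: (c :: t) then "it is".toList ++ scanAbbr (t.drop 3)
      else if "i'm".toList <+: (c :: t) then "i am".toList ++ scanAbbr (t.drop 2)
      else c :: scanAbbr t := by
  rw [scanAbbr.eq_def]

lemma replace_go_eq (a : Char) (k v : List Char) :
    ∀ (fuel : Nat) (l acc : List Char), l.length ≤ fuel →
      PySem.Chars.replace.go (a :: k) v fuel l acc = acc.reverse ++ replL a k v l := by
  intro fuel
  induction fuel with
  | zero =>
    intro l acc hl
    have : l = [] := List.eq_nil_of_length_eq_zero (Nat.le_zero.mp hl)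
    subst this
    rw [PySem.Chars.replace.go, replL_nil]
  | succ n ih =>
    intro l acc hl
    cases l with
    | nil =>
      rw [PySem.Chars.replace.go]
      · rw [replL_nil]; simp
      · omega
    | cons c t =>
      rw [PySem.Chars.replace.go]
      by_cases h : (a :: k) <+: (c :: t)
      · have hb : (a :: k).isPrefixOf (c :: t) = true := by
          simpa [List.isPrefixOf_iff_prefix] using h
        simp only [hb, if_true]
        have hdrop : List.drop (a :: k).length (c :: t) = t.drop k.length := by simp
        rw [hdrop, ih _ _ (by rw [List.length_drop]; simp only [List.length_cons] at hl; omega)]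
        rw [replL_cons, if_pos h]
        simp
      · have hb : (a :: k).isPrefixOf (c :: t) = false := by
          rw [Bool.eq_false_iff]
          intro hc
          exact h (by simpa [List.isPrefixOf_iff_prefix] using hc)
        simp only [hb, Bool.false_eq_true, if_false]
        rw [ih _ _ (by simp only [List.length_cons] at hl; omega)]
        rw [replL_cons, if_neg h]
        simp

lemma replace_eq_replL (a : Char) (k v : List Char) (l : List Char) :
    PySem.Chars.replace l (a :: k) v = replL a k v l := by
  rw [PySem.Chars.replace]
  simp only [List.isEmpty_cons, Bool.false_eq_true, if_false]
  simpa using replace_go_eq a k v l.length l [] le_rfl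

lemma replL_prefix (a : Char) (k v u : List Char) :
    replL a k v ((a :: k) ++ u) = v ++ replL a k v u := by
  rw [List.cons_append, replL_cons]
  have h : (a :: k) <+: (a :: (k ++ u)) := by
    simp
  rw [if_pos h, List.drop_left]

lemma replL_cons_not (a : Char) (k v : List Char) (c : Char) (t : List Char)
    (h : ¬ (a :: k) <+: (c :: t)) : replL a k v (c :: t) = c :: replL a k v t := by
  rw [replL_cons, if_neg h]

-- pushing a pass through a block K that cannot interact with the key at all:
-- no nonempty suffix of K is prefix-comparable with the key
lemma replL_append_sep (a : Char) (k v K : List Char)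
    (hsep : ∀ q ∈ K.tails, q ≠ [] → ¬ q <+: (a :: k) ∧ ¬ (a :: k) <+: q) :
    ∀ u, replL a k v (K ++ u) = K ++ replL a k v u := by
  induction K with
  | nil => intro u; simp
  | cons c K' ih =>
    intro u
    have hno : ¬ (a :: k) <+: ((c :: K') ++ u) := by
      intro h
      have hq : (c :: K') <+: ((c :: K') ++ u) := List.prefix_append _ _
      have hcm := List.prefix_or_prefix_of_prefix h hq
      have := hsep (c :: K') (by simp [List.mem_tails]) (by simp)
      rcases hcm with h1 | h1
      · exact this.2 h1
      · exact this.1 h1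
    rw [List.cons_append, replL_cons_not a k v c (K' ++ u) hno]
    rw [ih (fun q hq hne => hsep q (by
      rw [List.mem_tails] at hq ⊢
      exact hq.trans (List.suffix_cons c K')) hne)]
    simp

lemma sep_cond (K ak : List Char)
    (h : decide (∀ q ∈ K.tails, q ≠ [] → ¬ q <+: ak ∧ ¬ ak <+: q) = true) :
    ∀ q ∈ K.tails, q ≠ [] → ¬ q <+: ak ∧ ¬ ak <+: q := of_decide_eq_true h

lemma tails_tail_closed (K : List Char) : ∀ p ∈ K.tails, p.tail ∈ K.tails := by
  intro p hp
  rw [List.mem_tails] at hp ⊢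
  exact (List.tail_suffix p).trans hp

-- a pass cannot CREATE a prefix from the family S (tail-closed; no nonempty member
-- is a prefix of the inserted text v, and all members are at most as long as v)
lemma replL_no_create (a : Char) (k v : List Char) (S : List (List Char))
    (hS : ∀ p ∈ S, p.tail ∈ S)
    (hv : ∀ p ∈ S, p ≠ [] → p.length ≤ v.length ∧ ¬ p <+: v) :
    ∀ l, ∀ p ∈ S, p <+: replL a k v l → p <+: l := by
  intro l
  induction l using replL.induct a k with
  | case1 =>
    intro p _ hp
    rw [replL_nil] at hp
    exact hp
  | case2 c t h ih =>
    intro p hpS hp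
    rw [replL_cons, if_pos h] at hp
    by_cases hne : p = []
    · subst hne; exact List.nil_prefix
    · exfalso
      obtain ⟨hlen, hnp⟩ := hv p hpS hne
      have hvpre : v <+: v ++ replL a k v (t.drop k.length) := List.prefix_append _ _
      exact hnp (List.prefix_of_prefix_length_le hp hvpre hlen)
  | case3 c t h ih =>
    intro p hpS hp
    rw [replL_cons, if_neg h] at hp
    cases p with
    | nil => exact List.nil_prefix
    | cons p0 p' =>
      rw [List.cons_prefix_cons] at hp ⊢
      exact ⟨hp.1, ih p' (hS _ hpS) hp.2⟩

-- if key is not a prefix of c :: t, it is still not a prefix after a pass on t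
lemma preserve_not_prefix (a : Char) (k v : List Char) (key : List Char) (c : Char) (t : List Char)
    (hv : ∀ p ∈ key.tails, p ≠ [] → p.length ≤ v.length ∧ ¬ p <+: v)
    (h : ¬ key <+: (c :: t)) : ¬ key <+: (c :: replL a k v t) := by
  intro hc
  cases key with
  | nil => exact h List.nil_prefix
  | cons q0 q' =>
    rw [List.cons_prefix_cons] at hc
    have hmem : q' ∈ (q0 :: q').tails := (List.mem_tails _ _).mpr (List.suffix_cons q0 q')
    have ht : q' <+: t :=
      replL_no_create a k v ((q0 :: q').tails) (tails_tail_closed _) hv t q' hmem hc.2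
    exact h (List.cons_prefix_cons.mpr ⟨hc.1, ht⟩)

-- the chain of the five passes, on lists (A's algorithm after replace_eq_replL)
def chainL (l : List Char) : List Char :=
  replL 'i' "'m".toList "i am".toList
    (replL 'i' "t's".toList "it is".toList
      (replL 'w' "hat's".toList "what is".toList
        (replL 'h' "asn't".toList "has not".toList
          (replL 'h' "aven't".toList "have not".toList l))))

lemma k1c : "haven't".toList = 'h' :: "aven't".toList := by decide
lemma k2c : "hasn't".toList = 'h' :: "asn't".toList := by decide
lemma k3c : "what's".toList = 'w' :: "hat's".toList := by decide
lemma k4c : "it's".toList = 'i' :: "t's".toList := by decide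
lemma k5c : "i'm".toList = 'i' :: "'m".toList := by decide

lemma chain_key1 (u : List Char) :
    chainL ("haven't".toList ++ u) = "have not".toList ++ chainL u := by
  unfold chainL
  rw [k1c, replL_prefix,
      replL_append_sep 'h' "asn't".toList _ _ (sep_cond _ _ (by decide)),
      replL_append_sep 'w' "hat's".toList _ _ (sep_cond _ _ (by decide)),
      replL_append_sep 'i' "t's".toList _ _ (sep_cond _ _ (by decide)),
      replL_append_sep 'i' "'m".toList _ _ (sep_cond _ _ (by decide))]

lemma chain_key2 (u : List Char) :
    chainL ("hasn't".toList ++ u) = "has not".toList ++ chainL u := by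
  unfold chainL
  rw [replL_append_sep 'h' "aven't".toList _ _ (sep_cond _ _ (by decide)),
      k2c, replL_prefix,
      replL_append_sep 'w' "hat's".toList _ _ (sep_cond _ _ (by decide)),
      replL_append_sep 'i' "t's".toList _ _ (sep_cond _ _ (by decide)),
      replL_append_sep 'i' "'m".toList _ _ (sep_cond _ _ (by decide))]

lemma chain_key3 (u : List Char) :
    chainL ("what's".toList ++ u) = "what is".toList ++ chainL u := by
  unfold chainL
  rw [replL_append_sep 'h' "aven't".toList _ _ (sep_cond _ _ (by decide)),
      replL_append_sep 'h' "asn't".toList _ _ (sep_cond _ _ (by decide)),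
      k3c, replL_prefix,
      replL_append_sep 'i' "t's".toList _ _ (sep_cond _ _ (by decide)),
      replL_append_sep 'i' "'m".toList _ _ (sep_cond _ _ (by decide))]

lemma chain_key4 (u : List Char) :
    chainL ("it's".toList ++ u) = "it is".toList ++ chainL u := by
  unfold chainL
  rw [replL_append_sep 'h' "aven't".toList _ _ (sep_cond _ _ (by decide)),
      replL_append_sep 'h' "asn't".toList _ _ (sep_cond _ _ (by decide)),
      replL_append_sep 'w' "hat's".toList _ _ (sep_cond _ _ (by decide)),
      k4c, replL_prefix,
      replL_append_sep 'i' "'m".toList _ _ (sep_cond _ _ (by decide))]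

lemma chain_key5 (u : List Char) :
    chainL ("i'm".toList ++ u) = "i am".toList ++ chainL u := by
  unfold chainL
  rw [replL_append_sep 'h' "aven't".toList _ _ (sep_cond _ _ (by decide)),
      replL_append_sep 'h' "asn't".toList _ _ (sep_cond _ _ (by decide)),
      replL_append_sep 'w' "hat's".toList _ _ (sep_cond _ _ (by decide)),
      replL_append_sep 'i' "t's".toList _ _ (sep_cond _ _ (by decide)),
      k5c, replL_prefix]

-- when no key starts at the head, all five passes keep the head character
lemma chain_no_key (c : Char) (t : List Char)
    (h1 : ¬ "haven't".toList <+: (c :: t)) (h2 : ¬ "hasn't".toList <+: (c :: t))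
    (h3 : ¬ "what's".toList <+: (c :: t)) (h4 : ¬ "it's".toList <+: (c :: t))
    (h5 : ¬ "i'm".toList <+: (c :: t)) :
    chainL (c :: t) = c :: chainL t := by
  have H2 : ¬ "hasn't".toList <+: (c :: replL 'h' "aven't".toList "have not".toList t) :=
    preserve_not_prefix _ _ _ _ _ _ (of_decide_eq_true (by decide)) h2
  have H3a : ¬ "what's".toList <+: (c :: replL 'h' "aven't".toList "have not".toList t) :=
    preserve_not_prefix _ _ _ _ _ _ (of_decide_eq_true (by decide)) h3
  have H3 : ¬ "what's".toList <+: (c :: replL 'h' "asn't".toList "has not".toList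
      (replL 'h' "aven't".toList "have not".toList t)) :=
    preserve_not_prefix _ _ _ _ _ _ (of_decide_eq_true (by decide)) H3a
  have H4a : ¬ "it's".toList <+: (c :: replL 'h' "aven't".toList "have not".toList t) :=
    preserve_not_prefix _ _ _ _ _ _ (of_decide_eq_true (by decide)) h4
  have H4b : ¬ "it's".toList <+: (c :: replL 'h' "asn't".toList "has not".toList
      (replL 'h' "aven't".toList "have not".toList t)) :=
    preserve_not_prefix _ _ _ _ _ _ (of_decide_eq_true (by decide)) H4a
  have H4 : ¬ "it's".toList <+: (c :: replL 'w' "hat's".toList "what is".toList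
      (replL 'h' "asn't".toList "has not".toList
        (replL 'h' "aven't".toList "have not".toList t))) :=
    preserve_not_prefix _ _ _ _ _ _ (of_decide_eq_true (by decide)) H4b
  have H5a : ¬ "i'm".toList <+: (c :: replL 'h' "aven't".toList "have not".toList t) :=
    preserve_not_prefix _ _ _ _ _ _ (of_decide_eq_true (by decide)) h5
  have H5b : ¬ "i'm".toList <+: (c :: replL 'h' "asn't".toList "has not".toList
      (replL 'h' "aven't".toList "have not".toList t)) :=
    preserve_not_prefix _ _ _ _ _ _ (of_decide_eq_true (by decide)) H5a
  have H5c : ¬ "i'm".toList <+: (c :: replL 'w' "hat's".toList "what is".toList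
      (replL 'h' "asn't".toList "has not".toList
        (replL 'h' "aven't".toList "have not".toList t))) :=
    preserve_not_prefix _ _ _ _ _ _ (of_decide_eq_true (by decide)) H5b
  have H5 : ¬ "i'm".toList <+: (c :: replL 'i' "t's".toList "it is".toList
      (replL 'w' "hat's".toList "what is".toList
        (replL 'h' "asn't".toList "has not".toList
          (replL 'h' "aven't".toList "have not".toList t)))) :=
    preserve_not_prefix _ _ _ _ _ _ (of_decide_eq_true (by decide)) H5c
  unfold chainL
  rw [replL_cons_not _ _ _ _ _ (k1c ▸ h1),
      replL_cons_not _ _ _ _ _ (k2c ▸ H2),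
      replL_cons_not _ _ _ _ _ (k3c ▸ H3),
      replL_cons_not _ _ _ _ _ (k4c ▸ H4),
      replL_cons_not _ _ _ _ _ (k5c ▸ H5)]

lemma drop_key_eq (key : List Char) (n : Nat) (c : Char) (t u : List Char)
    (hlen : key.length = n + 1) (hu : key ++ u = c :: t) : t.drop n = u := by
  have := congrArg (List.drop key.length) hu
  rw [List.drop_left] at this
  rw [this, hlen]
  simp

-- main list-level equivalence: the five sequential passes equal the single scan
lemma chain_eq_scan : ∀ l, chainL l = scanAbbr l := by
  intro l
  induction l using scanAbbr.induct with
  | case1 =>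
    rw [scanAbbr_nil]
    unfold chainL
    simp [replL_nil]
  | case2 c t h ih =>
    obtain ⟨u, hu⟩ := h
    have hd : t.drop 6 = u := drop_key_eq _ 6 c t u (by decide) hu
    rw [hd] at ih
    rw [scanAbbr_cons, if_pos ⟨u, hu⟩, ← hu, chain_key1, hd, ih]
  | case3 c t h1 h ih =>
    obtain ⟨u, hu⟩ := h
    have hd : t.drop 5 = u := drop_key_eq _ 5 c t u (by decide) hu
    rw [hd] at ih
    rw [scanAbbr_cons, if_neg h1, if_pos ⟨u, hu⟩, ← hu, chain_key2, hd, ih]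
  | case4 c t h1 h2 h ih =>
    obtain ⟨u, hu⟩ := h
    have hd : t.drop 5 = u := drop_key_eq _ 5 c t u (by decide) hu
    rw [hd] at ih
    rw [scanAbbr_cons, if_neg h1, if_neg h2, if_pos ⟨u, hu⟩, ← hu, chain_key3, hd, ih]
  | case5 c t h1 h2 h3 h ih =>
    obtain ⟨u, hu⟩ := h
    have hd : t.drop 3 = u := drop_key_eq _ 3 c t u (by decide) hu
    rw [hd] at ih
    rw [scanAbbr_cons, if_neg h1, if_neg h2, if_neg h3, if_pos ⟨u, hu⟩, ← hu, chain_key4, hd, ih]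
  | case6 c t h1 h2 h3 h4 h ih =>
    obtain ⟨u, hu⟩ := h
    have hd : t.drop 2 = u := drop_key_eq _ 2 c t u (by decide) hu
    rw [hd] at ih
    rw [scanAbbr_cons, if_neg h1, if_neg h2, if_neg h3, if_neg h4, if_pos ⟨u, hu⟩, ← hu,
        chain_key5, hd, ih]
  | case7 c t h1 h2 h3 h4 h5 ih =>
    rw [scanAbbr_cons, if_neg h1, if_neg h2, if_neg h3, if_neg h4, if_neg h5,
        chain_no_key c t h1 h2 h3 h4 h5, ih]

-- ===== VERDICT (by name: the statement is the Claim_ definition above) =====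
theorem expand_abbr_spec : Claim_equal_expand_abbr := by
  intro line _
  unfold Spec_expand_abbr expand_abbr expand_abbr_alt
  simp only [List.foldl, PySem.Str.replace, String.toList_ofList]
  rw [k1c, k2c, k3c, k4c, k5c,
      replace_eq_replL 'h' "aven't".toList, replace_eq_replL 'h' "asn't".toList,
      replace_eq_replL 'w' "hat's".toList, replace_eq_replL 'i' "t's".toList,
      replace_eq_replL 'i' "'m".toList]
  exact congrArg String.ofList (chain_eq_scan line.toList)
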